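-- pv_equiv track=rewrite | github.com/omerahm/USHealthcareData | NPI_Data_Fetcher.py | extract_address_details
-- ===== SOURCE A (Python) =====
-- def extract_address_details(npi_data):
--     addresses = npi_data.get('addresses', [])
--     mailing_address = primary_address = secondary_address = {
--         'address_1': '', 'address_2': '', 'city': '', 'state': '', 'postal_code': '', 'telephone_number': '', 'fax_number': ''}
--     for address in addresses:
--         if address.get('address_purpose') == 'MAILING':
--             mailing_address = address
--         elif address.get('address_purpose') == 'LOCATION':
--             primary_address = address
--         elif address.get('address_purpose') == 'SECONDARY':
--             secondary_address = address
--     return mailing_address, primary_address, secondary_address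
-- ===== SOURCE B (Python) =====
-- def extract_address_details(npi_data):
--     default = {'address_1': '', 'address_2': '', 'city': '', 'state': '',
--                'postal_code': '', 'telephone_number': '', 'fax_number': ''}
--
--     def last_with_purpose(addresses, purpose):
--         # first match scanning back-to-front == last match in original order
--         for address in reversed(addresses):
--             if address.get('address_purpose') == purpose:
--                 return address
--         return default
--
--     addresses = npi_data.get('addresses', [])
--     return (last_with_purpose(addresses, 'MAILING'),
--             last_with_purpose(addresses, 'LOCATION'),
--             last_with_purpose(addresses, 'SECONDARY'))
-- ===== Notes on version B (the rewrite author's own statement) =====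
-- stated objective: alternative
-- what changed: Replaces A's single forward loop that maintains a three-slot accumulator with three independent back-to-front searches, each returning the first match in reversed order (= A's last-wins) or the shared default.
import Mathlib
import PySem

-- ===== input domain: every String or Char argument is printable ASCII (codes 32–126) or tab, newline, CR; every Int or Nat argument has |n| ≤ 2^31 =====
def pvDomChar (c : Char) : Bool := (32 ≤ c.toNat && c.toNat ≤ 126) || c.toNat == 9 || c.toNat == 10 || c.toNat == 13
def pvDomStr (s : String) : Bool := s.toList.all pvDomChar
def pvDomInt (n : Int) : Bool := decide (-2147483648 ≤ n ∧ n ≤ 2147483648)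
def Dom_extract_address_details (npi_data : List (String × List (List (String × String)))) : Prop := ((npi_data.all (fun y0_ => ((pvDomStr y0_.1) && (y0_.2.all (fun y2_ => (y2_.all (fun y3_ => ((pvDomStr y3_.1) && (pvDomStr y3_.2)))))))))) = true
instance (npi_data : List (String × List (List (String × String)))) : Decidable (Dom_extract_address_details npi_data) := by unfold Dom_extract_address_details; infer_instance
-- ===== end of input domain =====

-- B replaces A's single forward loop with a three-slot accumulator by three independent
-- back-to-front searches (first match in reversed order = A's last-wins), sharing one default (alternative).

-- ===== PORT A =====
-- the shared default address dict literal of A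
def pvDefaultAddr : List (String × String) :=
  [("address_1",""),("address_2",""),("city",""),("state",""),("postal_code",""),("telephone_number",""),("fax_number","")]

def extract_address_details (npi_data : List (String × List (List (String × String)))) : (List (String × String)) × (List (String × String)) × (List (String × String)) :=
  let addresses := (PySem.Dict.mk npi_data).getD "addresses" []
  let st := addresses.foldl (fun st address =>
    if (PySem.Dict.mk address).get? "address_purpose" = some "MAILING" then
      (address, st.2.1, st.2.2)
    else if (PySem.Dict.mk address).get? "address_purpose" = some "LOCATION" then
      (st.1, address, st.2.2)
    else if (PySem.Dict.mk address).get? "address_purpose" = some "SECONDARY" then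
      (st.1, st.2.1, address)
    else st) (pvDefaultAddr, pvDefaultAddr, pvDefaultAddr)
  st

-- ===== PORT B =====
-- Source B's default dict literal
def pvDefaultAddrB : List (String × String) :=
  [("address_1",""),("address_2",""),("city",""),("state",""),("postal_code",""),("telephone_number",""),("fax_number","")]

-- Source B's last_with_purpose: the loop over reversed(addresses) returning the first match;
-- here the recursion runs over the already-reversed list
def pvScanRev (purpose : String) : List (List (String × String)) → List (String × String)
  | [] => pvDefaultAddrB
  | address :: rest =>
    if (PySem.Dict.mk address).get? "address_purpose" = some purpose then address
    else pvScanRev purpose rest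

def extract_address_details_alt (npi_data : List (String × List (List (String × String)))) : (List (String × String)) × (List (String × String)) × (List (String × String)) :=
  let addresses := (PySem.Dict.mk npi_data).getD "addresses" []
  (pvScanRev "MAILING" addresses.reverse,
   pvScanRev "LOCATION" addresses.reverse,
   pvScanRev "SECONDARY" addresses.reverse)

-- ===== PRECONDITION & SPEC =====
def Spec_extract_address_details (npi_data : List (String × List (List (String × String)))) (out : (List (String × String)) × (List (String × String)) × (List (String × String))) : Prop := out = extract_address_details_alt npi_data
instance (npi_data : List (String × List (List (String × String)))) (out : (List (String × String)) × (List (String × String)) × (List (String × String))) : Decidable (Spec_extract_address_details npi_data out) := by unfold Spec_extract_address_details; infer_instance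

-- ===== CLAIM (what is proved, stated in full; the proofs are below) =====
def Claim_equal_extract_address_details : Prop := ∀ (npi_data : List (String × List (List (String × String)))), Dom_extract_address_details npi_data → Spec_extract_address_details npi_data (extract_address_details npi_data)

-- ===== LEMMAS AND PROOFS =====

-- generalized back-to-front search with an arbitrary fallback (proof-only helper)
def pvScanRevWith (purpose : String) : List (List (String × String)) → List (String × String) → List (String × String)
  | [], d => d
  | address :: rest, d =>
    if (PySem.Dict.mk address).get? "address_purpose" = some purpose then address
    else pvScanRevWith purpose rest d

theorem pvScanRev_eq_with (purpose : String) (xs : List (List (String × String))) :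
    pvScanRev purpose xs = pvScanRevWith purpose xs pvDefaultAddrB := by
  induction xs with
  | nil => rfl
  | cons x t ih => simp only [pvScanRev, pvScanRevWith]; split <;> [rfl; exact ih]

-- searching xs ++ [a]: the suffix is reached only when xs has no match, which is exactly
-- replacing the fallback by a (when a matches) in the search over xs
theorem pvScanRevWith_append_singleton (purpose : String) (xs : List (List (String × String)))
    (a d : List (String × String)) :
    pvScanRevWith purpose (xs ++ [a]) d
      = pvScanRevWith purpose xs
          (if (PySem.Dict.mk a).get? "address_purpose" = some purpose then a else d) := by
  induction xs with
  | nil => rfl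
  | cons x t ih => simp only [List.cons_append, pvScanRevWith]; split <;> [rfl; exact ih]

-- loop invariant: A's running triple equals B's three reversed searches with the
-- triple's components as fallbacks
theorem pv_fold_inv (l : List (List (String × String))) (m p s : List (String × String)) :
    l.foldl (fun st address =>
      if (PySem.Dict.mk address).get? "address_purpose" = some "MAILING" then
        (address, st.2.1, st.2.2)
      else if (PySem.Dict.mk address).get? "address_purpose" = some "LOCATION" then
        (st.1, address, st.2.2)
      else if (PySem.Dict.mk address).get? "address_purpose" = some "SECONDARY" then
        (st.1, st.2.1, address)
      else st) (m, p, s)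
    = (pvScanRevWith "MAILING" l.reverse m,
       pvScanRevWith "LOCATION" l.reverse p,
       pvScanRevWith "SECONDARY" l.reverse s) := by
  induction l generalizing m p s with
  | nil => rfl
  | cons a t ih =>
    simp only [List.foldl_cons, List.reverse_cons, pvScanRevWith_append_singleton]
    by_cases h1 : (PySem.Dict.mk a).get? "address_purpose" = some "MAILING"
    · rw [if_pos h1, ih]
      rw [if_pos h1, if_neg (by rw [h1]; decide), if_neg (by rw [h1]; decide)]
    · rw [if_neg h1]
      by_cases h2 : (PySem.Dict.mk a).get? "address_purpose" = some "LOCATION"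
      · rw [if_pos h2, ih]
        rw [if_neg (by rw [h2]; decide), if_pos h2, if_neg (by rw [h2]; decide)]
      · rw [if_neg h2]
        by_cases h3 : (PySem.Dict.mk a).get? "address_purpose" = some "SECONDARY"
        · rw [if_pos h3, ih]
          rw [if_neg (by rw [h3]; decide), if_neg (by rw [h3]; decide), if_pos h3]
        · rw [if_neg h3, ih, if_neg h1, if_neg h2, if_neg h3]

-- ===== VERDICT (by name: the statement is the Claim_ definition above) =====
theorem extract_address_details_spec : Claim_equal_extract_address_details := by
  intro npi_data _
  unfold Spec_extract_address_details extract_address_details extract_address_details_alt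
  simp only [pvScanRev_eq_with]
  exact pv_fold_inv _ _ _ _
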